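-- pv_equiv track=rewrite | github.com/junhoyeo/WriteUps | NYPC-2018/day-2/prob09.py | layer_nodes
-- ===== SOURCE A (Python) =====
-- def layer_nodes(h):
--     node = 1
--     layer = 0
--     prev = 0
--     l = []
--     while layer <= h:
--         if layer != 0:
--             l = list(range(prev, node))
--         prev = node
--         node *= 2
--         layer += 1
--     return [i-1 for i in l]
-- ===== SOURCE B (Python) =====
-- def layer_nodes(h):
--     if h <= 0:
--         return []
--     return list(range(2 ** (h - 1) - 1, 2 ** h - 1))
-- ===== Notes on version B (the rewrite author's own statement) =====
-- stated objective: faster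
-- what changed: Replaces the layer-by-layer loop (which overwrites l each iteration so only the last layer survives) with a closed-form range for the bottom layer, shifted by 1 in the bounds instead of a final list comprehension.
import Mathlib
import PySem

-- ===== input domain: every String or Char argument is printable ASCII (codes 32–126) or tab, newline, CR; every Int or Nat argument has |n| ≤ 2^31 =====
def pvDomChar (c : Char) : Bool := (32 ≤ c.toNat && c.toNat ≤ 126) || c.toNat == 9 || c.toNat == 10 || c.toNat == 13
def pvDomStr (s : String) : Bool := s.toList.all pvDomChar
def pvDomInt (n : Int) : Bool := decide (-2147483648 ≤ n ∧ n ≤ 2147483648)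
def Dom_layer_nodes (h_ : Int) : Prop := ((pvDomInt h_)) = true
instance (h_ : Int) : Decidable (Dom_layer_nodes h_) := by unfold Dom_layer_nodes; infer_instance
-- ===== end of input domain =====

-- B replaces A's layer-by-layer loop by the closed-form range of the bottom layer (faster in a timing run's mechanism label 'constant': no per-layer work).

-- ===== PORT A =====
-- fuel counts the remaining iterations ((h+1 - layer).toNat at entry); the while-condition is still tested each step
def layerLoopA (fuel : Nat) (node layer prev : Int) (l : List Int) (h : Int) : List Int :=
  match fuel with
  | 0 => l
  | n+1 =>
    if layer ≤ h then
      let l' := if layer ≠ 0 then PySem.List.pyRange prev node 1 else l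
      layerLoopA n (node * 2) (layer + 1) node l' h
    else l

def layer_nodes (h_ : Int) : List Int :=
  (layerLoopA (h_ + 1).toNat 1 0 0 [] h_).map (fun i => i - 1)

-- ===== PORT B =====
def layer_nodes_alt (h_ : Int) : List Int :=
  if h_ ≤ 0 then []
  else PySem.List.pyRange (2 ^ (h_ - 1).toNat - 1) (2 ^ h_.toNat - 1) 1

-- ===== PRECONDITION & SPEC =====
def Spec_layer_nodes (h_ : Int) (out : List Int) : Prop := out = layer_nodes_alt h_
instance (h_ : Int) (out : List Int) : Decidable (Spec_layer_nodes h_ out) := by unfold Spec_layer_nodes; infer_instance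

-- ===== CLAIM (what is proved, stated in full; the proofs are below) =====
def Claim_equal_layer_nodes : Prop := ∀ (h_ : Int), Dom_layer_nodes h_ → Spec_layer_nodes h_ (layer_nodes h_)

-- ===== LEMMAS AND PROOFS =====

-- one-step unfolding of the while loop
theorem layerLoopA_succ (n : Nat) (node layer prev : Int) (l : List Int) (h : Int) :
    layerLoopA (n+1) node layer prev l h
      = if layer ≤ h then
          layerLoopA n (node * 2) (layer + 1) node
            (if layer ≠ 0 then PySem.List.pyRange prev node 1 else l) h
        else l := rfl

-- invariant from layer 1 on: node = 2*prev, and n more layers after this one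
theorem layerLoopA_inv (n : Nat) : ∀ (prev layer : Int) (l : List Int) (h : Int),
    1 ≤ layer → h = layer + n →
    layerLoopA (n+1) (2 * prev) layer prev l h
      = PySem.List.pyRange (prev * 2 ^ n) (2 * prev * 2 ^ n) 1 := by
  induction n with
  | zero =>
    intro prev layer l h h1 hh
    rw [layerLoopA_succ]
    have hle : layer ≤ h := by omega
    have hne : layer ≠ 0 := by omega
    simp only [if_pos hle, hne, ne_eq, not_false_eq_true, if_true, layerLoopA]
    simp [mul_comm]
  | succ n ih =>
    intro prev layer l h h1 hh
    have hle : layer ≤ h := by omega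
    have hne : layer ≠ 0 := by omega
    rw [layerLoopA_succ, if_pos hle]
    simp only [hne, ne_eq, not_false_eq_true, if_true]
    have e : (2 * prev) * 2 = 2 * (2 * prev) := by ring
    rw [e, ih (2 * prev) (layer + 1) _ h (by omega) (by push_cast; omega)]
    congr 1 <;> ring

theorem map_sub_one_pyRange (a b : Int) :
    (PySem.List.pyRange a b 1).map (fun i => i - 1)
      = PySem.List.pyRange (a - 1) (b - 1) 1 := by
  rw [PySem.List.pyRange_one, PySem.List.pyRange_one, List.map_map]
  have e : (b - a).toNat = (b - 1 - (a - 1)).toNat := by omega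
  rw [← e]
  apply List.map_congr_left
  intro k _
  simp; ring

-- ===== VERDICT (by name: the statement is the Claim_ definition above) =====
theorem layer_nodes_spec : Claim_equal_layer_nodes := by
  intro h _
  unfold Spec_layer_nodes layer_nodes layer_nodes_alt
  by_cases hle : h ≤ 0
  · -- h ≤ 0: the loop body never assigns l (at most the layer-0 iteration runs)
    rw [if_pos hle]
    rcases lt_or_eq_of_le hle with hlt | heq
    · have e : (h + 1).toNat = 0 := by omega
      simp [e, layerLoopA]
    · subst heq
      have e : ((0:Int) + 1).toNat = 0 + 1 := by decide
      rw [e, layerLoopA_succ]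
      simp [layerLoopA]
  · rw [if_neg hle]
    rw [not_le] at hle
    have h1 : (1:Int) ≤ h := hle
    -- unfold the layer-0 iteration, then apply the invariant from layer 1
    have hfuel : (h + 1).toNat = ((h - 1).toNat + 1) + 1 := by omega
    rw [hfuel, layerLoopA_succ, if_pos (by omega : (0:Int) ≤ h)]
    simp only [ne_eq, not_true_eq_false, if_false]
    have e2 : (1:Int) * 2 = 2 * 1 := by ring
    rw [e2, layerLoopA_inv (h - 1).toNat 1 (0 + 1) [] h (by omega) (by push_cast; omega),
        map_sub_one_pyRange]
    have e3 : (1:Int) * 2 ^ (h-1).toNat = 2 ^ (h-1).toNat := by ring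
    have e4 : (2:Int) * 1 * 2 ^ (h-1).toNat = 2 ^ h.toNat := by
      have e5 : h.toNat = (h-1).toNat + 1 := by omega
      rw [e5]; ring
    rw [e3, e4]
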